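-- pv_equiv track=rewrite | github.com/brunowinter8192/searxng-mcp | src/scraper/markdown_converter.py | clean_german_url_decode
-- ===== SOURCE A (Python) =====
-- def clean_german_url_decode(markdown: str) -> str:
--     replacements = {
--         '%C3%A4': 'ä', '%C3%84': 'Ä',
--         '%C3%BC': 'ü', '%C3%9C': 'Ü',
--         '%C3%B6': 'ö', '%C3%96': 'Ö',
--         '%C3%9F': 'ß',
--         '%28': '(', '%29': ')',
--     }
--     for encoded, decoded in replacements.items():
--         markdown = markdown.replace(encoded, decoded)
--     return markdown
-- ===== SOURCE B (Python) =====
-- # encoded token -> decoded character, in the order the tokens are tried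
-- _REPLACEMENTS = {
--     '%C3%A4': 'ä',
--     '%C3%84': 'Ä',
--     '%C3%BC': 'ü',
--     '%C3%9C': 'Ü',
--     '%C3%B6': 'ö',
--     '%C3%96': 'Ö',
--     '%C3%9F': 'ß',
--     '%28': '(',
--     '%29': ')',
-- }
--
--
-- def clean_german_url_decode(markdown: str) -> str:
--     # single left-to-right scan: at each position emit the decoding of the
--     # first matching encoded token, or the character itself
--     out = []
--     i = 0
--     n = len(markdown)
--     while i < n:
--         for encoded, decoded in _REPLACEMENTS.items():
--             if markdown.startswith(encoded, i):
--                 out.append(decoded)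
--                 i += len(encoded)
--                 break
--         else:
--             out.append(markdown[i])
--             i += 1
--     return ''.join(out)
-- ===== Notes on version B (the rewrite author's own statement) =====
-- stated objective: alternative
-- what changed: A does nine sequential full-string str.replace passes (one per token); B makes a single left-to-right scan that at each position emits the decoding of the first matching encoded token from the table, which is equivalent because the tokens never overlap and the decoded characters never create new token occurrences.
import Mathlib
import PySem

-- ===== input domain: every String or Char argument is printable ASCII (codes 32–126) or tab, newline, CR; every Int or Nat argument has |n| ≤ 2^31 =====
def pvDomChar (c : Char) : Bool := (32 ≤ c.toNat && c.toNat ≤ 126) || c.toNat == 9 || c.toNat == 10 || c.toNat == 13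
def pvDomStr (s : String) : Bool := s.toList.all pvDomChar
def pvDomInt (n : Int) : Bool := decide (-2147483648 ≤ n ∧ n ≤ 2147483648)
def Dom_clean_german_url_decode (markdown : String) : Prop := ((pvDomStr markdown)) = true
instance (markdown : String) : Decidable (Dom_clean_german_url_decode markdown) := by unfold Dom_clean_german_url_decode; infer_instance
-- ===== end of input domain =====

-- B replaces A's nine sequential full-string str.replace scans by one left-to-right
-- scan with a first-match token table (objective: alternative; no speed claim).

-- ===== PORT A =====
-- A: the nine str.replace calls, in the dict's insertion order.
def clean_german_url_decode (markdown : String) : String :=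
  let m := PySem.Str.replace markdown "%C3%A4" "ä"
  let m := PySem.Str.replace m "%C3%84" "Ä"
  let m := PySem.Str.replace m "%C3%BC" "ü"
  let m := PySem.Str.replace m "%C3%9C" "Ü"
  let m := PySem.Str.replace m "%C3%B6" "ö"
  let m := PySem.Str.replace m "%C3%96" "Ö"
  let m := PySem.Str.replace m "%C3%9F" "ß"
  let m := PySem.Str.replace m "%28" "("
  let m := PySem.Str.replace m "%29" ")"
  m

-- ===== PORT B =====
-- the (encoded, decoded) pairs of _REPLACEMENTS, in dict insertion order
def pvTable : List (List Char × Char) :=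
  [ (['%','C','3','%','A','4'], 'ä'), (['%','C','3','%','8','4'], 'Ä'),
    (['%','C','3','%','B','C'], 'ü'), (['%','C','3','%','9','C'], 'Ü'),
    (['%','C','3','%','B','6'], 'ö'), (['%','C','3','%','9','6'], 'Ö'),
    (['%','C','3','%','9','F'], 'ß'),
    (['%','2','8'], '('), (['%','2','9'], ')') ]

def pvScan : Nat → List Char → List Char
  | 0, l => l
  | fuel+1, l =>
    match pvTable.find? (fun e => e.1.isPrefixOf l) with
    | some e => e.2 :: pvScan fuel (l.drop e.1.length)
    | none =>
      match l with
      | [] => []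
      | c :: t => c :: pvScan fuel t

def clean_german_url_decode_alt (markdown : String) : String :=
  String.ofList (pvScan markdown.toList.length markdown.toList)

-- ===== PRECONDITION & SPEC =====
def Spec_clean_german_url_decode (markdown : String) (out : String) : Prop := out = clean_german_url_decode_alt markdown
instance (markdown : String) (out : String) : Decidable (Spec_clean_german_url_decode markdown out) := by unfold Spec_clean_german_url_decode; infer_instance

-- ===== CLAIM (what is proved, stated in full; the proofs are below) =====
def Claim_equal_clean_german_url_decode : Prop := ∀ (markdown : String), Dom_clean_german_url_decode markdown → Spec_clean_german_url_decode markdown (clean_german_url_decode markdown)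

-- ===== LEMMAS AND PROOFS =====

-- clean reformulation of PySem.Chars.replace for a nonempty needle o::os and a
-- one-character replacement v
def pvRep (o : Char) (os : List Char) (v : Char) : List Char → List Char
  | [] => []
  | c :: t =>
    if (o :: os).isPrefixOf (c :: t) then v :: pvRep o os v (t.drop os.length)
    else c :: pvRep o os v t
termination_by l => l.length
decreasing_by
  · simp only [List.length_cons, List.length_drop]; omega
  · simp

theorem pvRep_hit (o : Char) (os : List Char) (v : Char) (Y : List Char) :
    pvRep o os v ((o :: os) ++ Y) = v :: pvRep o os v Y := by
  rw [List.cons_append, pvRep]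
  rw [if_pos (by exact List.isPrefixOf_iff_prefix.mpr ⟨Y, by simp⟩)]
  simp

theorem pvRep_skip (o : Char) (os : List Char) (v c : Char) (Z : List Char) (h : c ≠ o) :
    pvRep o os v (c :: Z) = c :: pvRep o os v Z := by
  rw [pvRep, if_neg]
  intro hpre
  rcases List.isPrefixOf_iff_prefix.mp hpre with ⟨t, ht⟩
  simp at ht
  exact h ht.1.symm

theorem pvRep_nohit (o : Char) (os : List Char) (v c : Char) (t : List Char)
    (h : ¬ (o :: os) <+: (c :: t)) :
    pvRep o os v (c :: t) = c :: pvRep o os v t := by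
  rw [pvRep, if_neg (fun hp => h (List.isPrefixOf_iff_prefix.mp hp))]

theorem pvRep_go_spec (o : Char) (os : List Char) (v : Char) :
    ∀ (fuel : Nat) (l acc : List Char), l.length ≤ fuel →
      PySem.Chars.replace.go (o :: os) [v] fuel l acc = acc.reverse ++ pvRep o os v l := by
  intro fuel
  induction fuel with
  | zero =>
    intro l acc hl
    have : l = [] := List.eq_nil_of_length_eq_zero (Nat.le_zero.mp hl)
    subst this
    simp [PySem.Chars.replace.go, pvRep]
  | succ n ih =>
    intro l acc hl
    match l with
    | [] => simp [PySem.Chars.replace.go, pvRep]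
    | c :: t =>
      rw [PySem.Chars.replace.go]
      by_cases hp : (o :: os).isPrefixOf (c :: t)
      · rw [if_pos hp, pvRep, if_pos hp]
        rw [ih _ _ (by simp at hl ⊢; omega)]
        simp
      · rw [if_neg hp, pvRep, if_neg hp]
        rw [ih _ _ (by simp at hl; omega)]
        simp

theorem pvReplace_eq_pvRep (o : Char) (os : List Char) (v : Char) (s : List Char) :
    PySem.Chars.replace s (o :: os) [v] = pvRep o os v s := by
  rw [PySem.Chars.replace]
  simp only [List.isEmpty_cons, Bool.false_eq_true, if_false]
  simpa using pvRep_go_spec o os v s.length s [] le_rfl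

-- the characters occurring in the encoded tokens
def pvKC : List Char := ['%', 'C', '3', 'A', '4', '8', 'B', '9', 'F', '2', '6']

def pvNoHit (k pre : List Char) : Bool :=
  decide (∀ off < pre.length, ∃ m < k.length, off + m < pre.length ∧ pre[off+m]? ≠ k[m]?)

theorem pv_not_prefix_of_mismatch (k pre X : List Char) (off m : Nat)
    (hm : off + m < pre.length) (hne : pre[off+m]? ≠ k[m]?) (hmk : m < k.length) :
    ¬ k <+: (pre.drop off ++ X) := by
  rintro ⟨t, ht⟩
  apply hne
  have h1 : (pre.drop off ++ X)[m]? = pre[off+m]? := by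
    rw [List.getElem?_append_left (by simp; omega), List.getElem?_drop]
  have h2 : (pre.drop off ++ X)[m]? = k[m]? := by
    rw [← ht, List.getElem?_append_left hmk]
  rw [← h1, h2]

theorem pvRep_pass_aux (o : Char) (os : List Char) (v : Char) :
    ∀ (pre : List Char),
    (∀ off < pre.length, ∃ m < (o :: os).length, off + m < pre.length ∧ pre[off+m]? ≠ (o :: os)[m]?) →
    ∀ (X : List Char),
    pvRep o os v (pre ++ X) = pre ++ pvRep o os v X := by
  intro pre
  induction pre with
  | nil => intro _ X; simp
  | cons c pre' ih =>
    intro h X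
    obtain ⟨m, hmk, hlt, hne⟩ := h 0 (by simp)
    have hnp : ¬ (o :: os) <+: ((c :: pre') ++ X) := by
      simpa using pv_not_prefix_of_mismatch (o :: os) (c :: pre') X 0 m (by simpa using hlt) (by simpa using hne) hmk
    rw [List.cons_append, pvRep_nohit _ _ _ _ _ (by simpa using hnp)]
    rw [ih (fun off hoff => by
      obtain ⟨m', hmk', hlt', hne'⟩ := h (off+1) (by simp; omega)
      exact ⟨m', hmk', by simp at hlt' ⊢; omega, by simpa [Nat.add_right_comm] using hne'⟩)]
    simp

theorem pvRep_pass (o : Char) (os : List Char) (v : Char) (pre : List Char)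
    (hB : pvNoHit (o :: os) pre = true) (X : List Char) :
    pvRep o os v (pre ++ X) = pre ++ pvRep o os v X :=
  pvRep_pass_aux o os v pre (of_decide_eq_true hB) X

-- replacing a token by a character outside pvKC never creates a new occurrence of a
-- pvKC-only needle
theorem pvRep_noCreate (o : Char) (os : List Char) (v : Char) (hv : v ∉ pvKC) :
    ∀ (n : Nat) (l : List Char), l.length ≤ n → ∀ (s : List Char), s ≠ [] → (∀ c ∈ s, c ∈ pvKC) → ¬ s <+: l →
      ¬ s <+: pvRep o os v l := by
  intro n
  induction n with
  | zero =>
    intro l hl s hs _ hnp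
    have : l = [] := List.eq_nil_of_length_eq_zero (Nat.le_zero.mp hl)
    subst this
    simpa [pvRep] using hnp
  | succ n ih =>
    intro l hl s hs hsc hnp
    match l with
    | [] => simpa [pvRep] using hnp
    | c :: t =>
      by_cases hp : (o :: os).isPrefixOf (c :: t)
      · rw [pvRep, if_pos hp]
        rintro ⟨u, hu⟩
        match s, hs with
        | a :: s', _ =>
          simp at hu
          exact hv (hu.1 ▸ hsc a (by simp))
      · rw [pvRep_nohit _ _ _ _ _ (fun hpre => hp (List.isPrefixOf_iff_prefix.mpr hpre))]
        match s, hs with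
        | a :: s', _ =>
          rintro ⟨u, hu⟩
          simp at hu
          obtain ⟨rfl, hu⟩ := hu
          match s' with
          | [] => exact hnp ⟨t, by simp⟩
          | b :: s'' =>
            have hnp' : ¬ (b :: s'') <+: t := by
              intro ⟨w, hw⟩; exact hnp ⟨w, by simp [hw]⟩
            exact ih t (by simp at hl; omega) (b :: s'') (by simp)
              (fun x hx => hsc x (List.mem_cons_of_mem a hx)) hnp' ⟨u, hu⟩

-- A's nine replaces, on the character level
def pvChainA (l : List Char) : List Char :=
  pvRep '%' ['2','9'] ')'
    (pvRep '%' ['2','8'] '('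
      (pvRep '%' ['C','3','%','9','F'] 'ß'
        (pvRep '%' ['C','3','%','9','6'] 'Ö'
          (pvRep '%' ['C','3','%','B','6'] 'ö'
            (pvRep '%' ['C','3','%','9','C'] 'Ü'
              (pvRep '%' ['C','3','%','B','C'] 'ü'
                (pvRep '%' ['C','3','%','8','4'] 'Ä'
                  (pvRep '%' ['C','3','%','A','4'] 'ä' l))))))))

set_option maxRecDepth 8192 in
theorem pvMain : ∀ (n : Nat) (l : List Char), l.length ≤ n → pvChainA l = pvScan n l := by
  intro n
  induction n with
  | zero =>
    intro l hl
    have : l = [] := List.eq_nil_of_length_eq_zero (Nat.le_zero.mp hl)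
    subst this
    simp [pvChainA, pvRep, pvScan]
  | succ n ih =>
    intro l hl
    rcases h : pvTable.find? (fun e => e.1.isPrefixOf l) with _ | e
    · -- no token matches at the front of l
      have hnone := List.find?_eq_none.mp h
      have h1 : ¬ ['%','C','3','%','A','4'] <+: l := by
        have := hnone (['%','C','3','%','A','4'], 'ä') (by simp [pvTable])
        simpa [List.isPrefixOf_iff_prefix] using this
      have h2 : ¬ ['%','C','3','%','8','4'] <+: l := by
        have := hnone (['%','C','3','%','8','4'], 'Ä') (by simp [pvTable])
        simpa [List.isPrefixOf_iff_prefix] using this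
      have h3 : ¬ ['%','C','3','%','B','C'] <+: l := by
        have := hnone (['%','C','3','%','B','C'], 'ü') (by simp [pvTable])
        simpa [List.isPrefixOf_iff_prefix] using this
      have h4 : ¬ ['%','C','3','%','9','C'] <+: l := by
        have := hnone (['%','C','3','%','9','C'], 'Ü') (by simp [pvTable])
        simpa [List.isPrefixOf_iff_prefix] using this
      have h5 : ¬ ['%','C','3','%','B','6'] <+: l := by
        have := hnone (['%','C','3','%','B','6'], 'ö') (by simp [pvTable])
        simpa [List.isPrefixOf_iff_prefix] using this
      have h6 : ¬ ['%','C','3','%','9','6'] <+: l := by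
        have := hnone (['%','C','3','%','9','6'], 'Ö') (by simp [pvTable])
        simpa [List.isPrefixOf_iff_prefix] using this
      have h7 : ¬ ['%','C','3','%','9','F'] <+: l := by
        have := hnone (['%','C','3','%','9','F'], 'ß') (by simp [pvTable])
        simpa [List.isPrefixOf_iff_prefix] using this
      have h8 : ¬ ['%','2','8'] <+: l := by
        have := hnone (['%','2','8'], '(') (by simp [pvTable])
        simpa [List.isPrefixOf_iff_prefix] using this
      have h9 : ¬ ['%','2','9'] <+: l := by
        have := hnone (['%','2','9'], ')') (by simp [pvTable])
        simpa [List.isPrefixOf_iff_prefix] using this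
      have hv1 : 'ä' ∉ pvKC := by decide
      have hk1 : ∀ c ∈ (['%','C','3','%','A','4'] : List Char), c ∈ pvKC := by intro c hc; fin_cases hc <;> decide
      have hv2 : 'Ä' ∉ pvKC := by decide
      have hk2 : ∀ c ∈ (['%','C','3','%','8','4'] : List Char), c ∈ pvKC := by intro c hc; fin_cases hc <;> decide
      have hv3 : 'ü' ∉ pvKC := by decide
      have hk3 : ∀ c ∈ (['%','C','3','%','B','C'] : List Char), c ∈ pvKC := by intro c hc; fin_cases hc <;> decide
      have hv4 : 'Ü' ∉ pvKC := by decide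
      have hk4 : ∀ c ∈ (['%','C','3','%','9','C'] : List Char), c ∈ pvKC := by intro c hc; fin_cases hc <;> decide
      have hv5 : 'ö' ∉ pvKC := by decide
      have hk5 : ∀ c ∈ (['%','C','3','%','B','6'] : List Char), c ∈ pvKC := by intro c hc; fin_cases hc <;> decide
      have hv6 : 'Ö' ∉ pvKC := by decide
      have hk6 : ∀ c ∈ (['%','C','3','%','9','6'] : List Char), c ∈ pvKC := by intro c hc; fin_cases hc <;> decide
      have hv7 : 'ß' ∉ pvKC := by decide
      have hk7 : ∀ c ∈ (['%','C','3','%','9','F'] : List Char), c ∈ pvKC := by intro c hc; fin_cases hc <;> decide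
      have hv8 : '(' ∉ pvKC := by decide
      have hk8 : ∀ c ∈ (['%','2','8'] : List Char), c ∈ pvKC := by intro c hc; fin_cases hc <;> decide
      have hv9 : ')' ∉ pvKC := by decide
      have hk9 : ∀ c ∈ (['%','2','9'] : List Char), c ∈ pvKC := by intro c hc; fin_cases hc <;> decide
      rcases l with _ | ⟨c, t⟩
      · simp [pvChainA, pvRep, pvScan, h]
      · have e1 : pvRep '%' ['C','3','%','A','4'] 'ä' (c :: t) = c :: pvRep '%' ['C','3','%','A','4'] 'ä' (t) := pvRep_nohit _ _ _ _ _ h1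
        have n2 : ¬ ['%','C','3','%','8','4'] <+: pvRep '%' ['C','3','%','A','4'] 'ä' (c :: t) := pvRep_noCreate '%' ['C','3','%','A','4'] 'ä' hv1 _ _ le_rfl ['%','C','3','%','8','4'] (by simp) hk2 (h2)
        have e2 : pvRep '%' ['C','3','%','8','4'] 'Ä' (pvRep '%' ['C','3','%','A','4'] 'ä' (c :: t)) = c :: pvRep '%' ['C','3','%','8','4'] 'Ä' (pvRep '%' ['C','3','%','A','4'] 'ä' (t)) := by
          rw [e1]; exact pvRep_nohit _ _ _ _ _ (e1 ▸ n2)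
        have n3 : ¬ ['%','C','3','%','B','C'] <+: pvRep '%' ['C','3','%','8','4'] 'Ä' (pvRep '%' ['C','3','%','A','4'] 'ä' (c :: t)) := pvRep_noCreate '%' ['C','3','%','8','4'] 'Ä' hv2 _ _ le_rfl ['%','C','3','%','B','C'] (by simp) hk3 (pvRep_noCreate '%' ['C','3','%','A','4'] 'ä' hv1 _ _ le_rfl ['%','C','3','%','B','C'] (by simp) hk3 (h3))
        have e3 : pvRep '%' ['C','3','%','B','C'] 'ü' (pvRep '%' ['C','3','%','8','4'] 'Ä' (pvRep '%' ['C','3','%','A','4'] 'ä' (c :: t))) = c :: pvRep '%' ['C','3','%','B','C'] 'ü' (pvRep '%' ['C','3','%','8','4'] 'Ä' (pvRep '%' ['C','3','%','A','4'] 'ä' (t))) := by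
          rw [e2]; exact pvRep_nohit _ _ _ _ _ (e2 ▸ n3)
        have n4 : ¬ ['%','C','3','%','9','C'] <+: pvRep '%' ['C','3','%','B','C'] 'ü' (pvRep '%' ['C','3','%','8','4'] 'Ä' (pvRep '%' ['C','3','%','A','4'] 'ä' (c :: t))) := pvRep_noCreate '%' ['C','3','%','B','C'] 'ü' hv3 _ _ le_rfl ['%','C','3','%','9','C'] (by simp) hk4 (pvRep_noCreate '%' ['C','3','%','8','4'] 'Ä' hv2 _ _ le_rfl ['%','C','3','%','9','C'] (by simp) hk4 (pvRep_noCreate '%' ['C','3','%','A','4'] 'ä' hv1 _ _ le_rfl ['%','C','3','%','9','C'] (by simp) hk4 (h4)))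
        have e4 : pvRep '%' ['C','3','%','9','C'] 'Ü' (pvRep '%' ['C','3','%','B','C'] 'ü' (pvRep '%' ['C','3','%','8','4'] 'Ä' (pvRep '%' ['C','3','%','A','4'] 'ä' (c :: t)))) = c :: pvRep '%' ['C','3','%','9','C'] 'Ü' (pvRep '%' ['C','3','%','B','C'] 'ü' (pvRep '%' ['C','3','%','8','4'] 'Ä' (pvRep '%' ['C','3','%','A','4'] 'ä' (t)))) := by
          rw [e3]; exact pvRep_nohit _ _ _ _ _ (e3 ▸ n4)
        have n5 : ¬ ['%','C','3','%','B','6'] <+: pvRep '%' ['C','3','%','9','C'] 'Ü' (pvRep '%' ['C','3','%','B','C'] 'ü' (pvRep '%' ['C','3','%','8','4'] 'Ä' (pvRep '%' ['C','3','%','A','4'] 'ä' (c :: t)))) := pvRep_noCreate '%' ['C','3','%','9','C'] 'Ü' hv4 _ _ le_rfl ['%','C','3','%','B','6'] (by simp) hk5 (pvRep_noCreate '%' ['C','3','%','B','C'] 'ü' hv3 _ _ le_rfl ['%','C','3','%','B','6'] (by simp) hk5 (pvRep_noCreate '%' ['C','3','%','8','4'] 'Ä' hv2 _ _ le_rfl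 ['%','C','3','%','B','6'] (by simp) hk5 (pvRep_noCreate '%' ['C','3','%','A','4'] 'ä' hv1 _ _ le_rfl ['%','C','3','%','B','6'] (by simp) hk5 (h5))))
        have e5 : pvRep '%' ['C','3','%','B','6'] 'ö' (pvRep '%' ['C','3','%','9','C'] 'Ü' (pvRep '%' ['C','3','%','B','C'] 'ü' (pvRep '%' ['C','3','%','8','4'] 'Ä' (pvRep '%' ['C','3','%','A','4'] 'ä' (c :: t))))) = c :: pvRep '%' ['C','3','%','B','6'] 'ö' (pvRep '%' ['C','3','%','9','C'] 'Ü' (pvRep '%' ['C','3','%','B','C'] 'ü' (pvRep '%' ['C','3','%','8','4'] 'Ä' (pvRep '%' ['C','3','%','A','4'] 'ä' (t))))) := by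
          rw [e4]; exact pvRep_nohit _ _ _ _ _ (e4 ▸ n5)
        have n6 : ¬ ['%','C','3','%','9','6'] <+: pvRep '%' ['C','3','%','B','6'] 'ö' (pvRep '%' ['C','3','%','9','C'] 'Ü' (pvRep '%' ['C','3','%','B','C'] 'ü' (pvRep '%' ['C','3','%','8','4'] 'Ä' (pvRep '%' ['C','3','%','A','4'] 'ä' (c :: t))))) := pvRep_noCreate '%' ['C','3','%','B','6'] 'ö' hv5 _ _ le_rfl ['%','C','3','%','9','6'] (by simp) hk6 (pvRep_noCreate '%' ['C','3','%','9','C'] 'Ü' hv4 _ _ le_rfl ['%','C','3','%','9','6'] (by simp) hk6 (pvRep_noCreate '%' ['C','3','%','B','C'] 'ü' hv3 _ _ le_rfl ['%','C','3','%','9','6'] (by simp) hk6 (pvRep_noCreate '%' ['C','3','%','8','4'] 'Ä' hv2 _ _ le_rfl ['%','C','3','%','9','6'] (by simp) hk6 (pvRep_noCreate '%' ['C','3','%','A','4'] 'ä' hv1 _ _ le_rfl ['%','C','3','%','9','6'] (by simp) hk6 (h6)))))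
        have e6 : pvRep '%' ['C','3','%','9','6'] 'Ö' (pvRep '%' ['C','3','%','B','6'] 'ö' (pvRep '%' ['C','3','%','9','C'] 'Ü' (pvRep '%' ['C','3','%','B','C'] 'ü' (pvRep '%' ['C','3','%','8','4'] 'Ä' (pvRep '%' ['C','3','%','A','4'] 'ä' (c :: t)))))) = c :: pvRep '%' ['C','3','%','9','6'] 'Ö' (pvRep '%' ['C','3','%','B','6'] 'ö' (pvRep '%' ['C','3','%','9','C'] 'Ü' (pvRep '%' ['C','3','%','B','C'] 'ü' (pvRep '%' ['C','3','%','8','4'] 'Ä' (pvRep '%' ['C','3','%','A','4'] 'ä' (t)))))) := by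
          rw [e5]; exact pvRep_nohit _ _ _ _ _ (e5 ▸ n6)
        have n7 : ¬ ['%','C','3','%','9','F'] <+: pvRep '%' ['C','3','%','9','6'] 'Ö' (pvRep '%' ['C','3','%','B','6'] 'ö' (pvRep '%' ['C','3','%','9','C'] 'Ü' (pvRep '%' ['C','3','%','B','C'] 'ü' (pvRep '%' ['C','3','%','8','4'] 'Ä' (pvRep '%' ['C','3','%','A','4'] 'ä' (c :: t)))))) := pvRep_noCreate '%' ['C','3','%','9','6'] 'Ö' hv6 _ _ le_rfl ['%','C','3','%','9','F'] (by simp) hk7 (pvRep_noCreate '%' ['C','3','%','B','6'] 'ö' hv5 _ _ le_rfl ['%','C','3','%','9','F'] (by simp) hk7 (pvRep_noCreate '%' ['C','3','%','9','C'] 'Ü' hv4 _ _ le_rfl ['%','C','3','%','9','F'] (by simp) hk7 (pvRep_noCreate '%' ['C','3','%','B','C'] 'ü' hv3 _ _ le_rfl ['%','C','3','%','9','F'] (by simp) hk7 (pvRep_noCreate '%' ['C','3','%','8','4'] 'Ä' hv2 _ _ le_rfl ['%','C','3','%','9','F'] (by simp) hk7 (pvRep_noCreate '%' ['C','3','%','A','4']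 'ä' hv1 _ _ le_rfl ['%','C','3','%','9','F'] (by simp) hk7 (h7))))))
        have e7 : pvRep '%' ['C','3','%','9','F'] 'ß' (pvRep '%' ['C','3','%','9','6'] 'Ö' (pvRep '%' ['C','3','%','B','6'] 'ö' (pvRep '%' ['C','3','%','9','C'] 'Ü' (pvRep '%' ['C','3','%','B','C'] 'ü' (pvRep '%' ['C','3','%','8','4'] 'Ä' (pvRep '%' ['C','3','%','A','4'] 'ä' (c :: t))))))) = c :: pvRep '%' ['C','3','%','9','F'] 'ß' (pvRep '%' ['C','3','%','9','6'] 'Ö' (pvRep '%' ['C','3','%','B','6'] 'ö' (pvRep '%' ['C','3','%','9','C'] 'Ü' (pvRep '%' ['C','3','%','B','C'] 'ü' (pvRep '%' ['C','3','%','8','4'] 'Ä' (pvRep '%' ['C','3','%','A','4'] 'ä' (t))))))) := by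
          rw [e6]; exact pvRep_nohit _ _ _ _ _ (e6 ▸ n7)
        have n8 : ¬ ['%','2','8'] <+: pvRep '%' ['C','3','%','9','F'] 'ß' (pvRep '%' ['C','3','%','9','6'] 'Ö' (pvRep '%' ['C','3','%','B','6'] 'ö' (pvRep '%' ['C','3','%','9','C'] 'Ü' (pvRep '%' ['C','3','%','B','C'] 'ü' (pvRep '%' ['C','3','%','8','4'] 'Ä' (pvRep '%' ['C','3','%','A','4'] 'ä' (c :: t))))))) := pvRep_noCreate '%' ['C','3','%','9','F'] 'ß' hv7 _ _ le_rfl ['%','2','8'] (by simp) hk8 (pvRep_noCreate '%' ['C','3','%','9','6'] 'Ö' hv6 _ _ le_rfl ['%','2','8'] (by simp) hk8 (pvRep_noCreate '%' ['C','3','%','B','6'] 'ö' hv5 _ _ le_rfl ['%','2','8'] (by simp) hk8 (pvRep_noCreate '%' ['C','3','%','9','C'] 'Ü' hv4 _ _ le_rfl ['%','2','8'] (by simp) hk8 (pvRep_noCreate '%' ['C','3','%','B','C'] 'ü' hv3 _ _ le_rfl ['%','2','8'] (by simp) hk8 (pvRep_noCreate '%' ['C','3','%','8','4'] 'Ä'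 hv2 _ _ le_rfl ['%','2','8'] (by simp) hk8 (pvRep_noCreate '%' ['C','3','%','A','4'] 'ä' hv1 _ _ le_rfl ['%','2','8'] (by simp) hk8 (h8)))))))
        have e8 : pvRep '%' ['2','8'] '(' (pvRep '%' ['C','3','%','9','F'] 'ß' (pvRep '%' ['C','3','%','9','6'] 'Ö' (pvRep '%' ['C','3','%','B','6'] 'ö' (pvRep '%' ['C','3','%','9','C'] 'Ü' (pvRep '%' ['C','3','%','B','C'] 'ü' (pvRep '%' ['C','3','%','8','4'] 'Ä' (pvRep '%' ['C','3','%','A','4'] 'ä' (c :: t)))))))) = c :: pvRep '%' ['2','8'] '(' (pvRep '%' ['C','3','%','9','F'] 'ß' (pvRep '%' ['C','3','%','9','6'] 'Ö' (pvRep '%' ['C','3','%','B','6'] 'ö' (pvRep '%' ['C','3','%','9','C'] 'Ü' (pvRep '%' ['C','3','%','B','C'] 'ü' (pvRep '%' ['C','3','%','8','4'] 'Ä' (pvRep '%' ['C','3','%','A','4'] 'ä' (t)))))))) := by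
          rw [e7]; exact pvRep_nohit _ _ _ _ _ (e7 ▸ n8)
        have n9 : ¬ ['%','2','9'] <+: pvRep '%' ['2','8'] '(' (pvRep '%' ['C','3','%','9','F'] 'ß' (pvRep '%' ['C','3','%','9','6'] 'Ö' (pvRep '%' ['C','3','%','B','6'] 'ö' (pvRep '%' ['C','3','%','9','C'] 'Ü' (pvRep '%' ['C','3','%','B','C'] 'ü' (pvRep '%' ['C','3','%','8','4'] 'Ä' (pvRep '%' ['C','3','%','A','4'] 'ä' (c :: t)))))))) := pvRep_noCreate '%' ['2','8'] '(' hv8 _ _ le_rfl ['%','2','9'] (by simp) hk9 (pvRep_noCreate '%' ['C','3','%','9','F'] 'ß' hv7 _ _ le_rfl ['%','2','9'] (by simp) hk9 (pvRep_noCreate '%' ['C','3','%','9','6'] 'Ö' hv6 _ _ le_rfl ['%','2','9'] (by simp) hk9 (pvRep_noCreate '%' ['C','3','%','B','6'] 'ö' hv5 _ _ le_rfl ['%','2','9'] (by simp) hk9 (pvRep_noCreate '%' ['C','3','%','9','C'] 'Ü' hv4 _ _ le_rfl ['%','2','9'] (by simp) hk9 (pvRep_noCreate '%' ['C','3','%','B','C']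 'ü' hv3 _ _ le_rfl ['%','2','9'] (by simp) hk9 (pvRep_noCreate '%' ['C','3','%','8','4'] 'Ä' hv2 _ _ le_rfl ['%','2','9'] (by simp) hk9 (pvRep_noCreate '%' ['C','3','%','A','4'] 'ä' hv1 _ _ le_rfl ['%','2','9'] (by simp) hk9 (h9))))))))
        have e9 : pvRep '%' ['2','9'] ')' (pvRep '%' ['2','8'] '(' (pvRep '%' ['C','3','%','9','F'] 'ß' (pvRep '%' ['C','3','%','9','6'] 'Ö' (pvRep '%' ['C','3','%','B','6'] 'ö' (pvRep '%' ['C','3','%','9','C'] 'Ü' (pvRep '%' ['C','3','%','B','C'] 'ü' (pvRep '%' ['C','3','%','8','4'] 'Ä' (pvRep '%' ['C','3','%','A','4'] 'ä' (c :: t))))))))) = c :: pvRep '%' ['2','9'] ')' (pvRep '%' ['2','8'] '(' (pvRep '%' ['C','3','%','9','F'] 'ß' (pvRep '%' ['C','3','%','9','6'] 'Ö' (pvRep '%' ['C','3','%','B','6'] 'ö' (pvRep '%' ['C','3','%','9','C'] 'Ü' (pvRep '%' ['C','3','%','B','C'] 'ü' (pvRep '%' ['C','3','%','8','4'] 'Ä'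 (pvRep '%' ['C','3','%','A','4'] 'ä' (t))))))))) := by
          rw [e8]; exact pvRep_nohit _ _ _ _ _ (e8 ▸ n9)
        have hlt : t.length ≤ n := by simp at hl; omega
        calc pvChainA (c :: t) = c :: pvChainA t := by unfold pvChainA; exact e9
          _ = c :: pvScan n t := by rw [ih t hlt]
          _ = pvScan (n+1) (c :: t) := by conv_rhs => rw [pvScan, h]
    · -- the first matching token e decodes the front of l
      have he : e ∈ pvTable := List.mem_of_find?_eq_some h
      have hpre : e.1.isPrefixOf l = true := by have := List.find?_some h; simpa using this
      simp only [pvTable, List.mem_cons, List.not_mem_nil, or_false] at he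
      rcases he with rfl|rfl|rfl|rfl|rfl|rfl|rfl|rfl|rfl
      · -- token 1
        simp only at hpre
        rcases List.isPrefixOf_iff_prefix.mp hpre with ⟨t, rfl⟩
        have hlt : t.length ≤ n := by simp at hl; omega
        calc pvChainA (['%','C','3','%','A','4'] ++ t) = 'ä' :: pvChainA t := by
              unfold pvChainA
              rw [pvRep_hit '%' ['C','3','%','A','4'] 'ä']
              rw [pvRep_skip '%' ['C','3','%','8','4'] 'Ä' 'ä' _ (by decide)]
              rw [pvRep_skip '%' ['C','3','%','B','C'] 'ü' 'ä' _ (by decide)]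
              rw [pvRep_skip '%' ['C','3','%','9','C'] 'Ü' 'ä' _ (by decide)]
              rw [pvRep_skip '%' ['C','3','%','B','6'] 'ö' 'ä' _ (by decide)]
              rw [pvRep_skip '%' ['C','3','%','9','6'] 'Ö' 'ä' _ (by decide)]
              rw [pvRep_skip '%' ['C','3','%','9','F'] 'ß' 'ä' _ (by decide)]
              rw [pvRep_skip '%' ['2','8'] '(' 'ä' _ (by decide)]
              rw [pvRep_skip '%' ['2','9'] ')' 'ä' _ (by decide)]
          _ = 'ä' :: pvScan n t := by rw [ih t hlt]
          _ = pvScan (n+1) (['%','C','3','%','A','4'] ++ t) := by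
              conv_rhs => rw [pvScan.eq_def]
              rfl
      · -- token 2
        simp only at hpre
        rcases List.isPrefixOf_iff_prefix.mp hpre with ⟨t, rfl⟩
        have hlt : t.length ≤ n := by simp at hl; omega
        calc pvChainA (['%','C','3','%','8','4'] ++ t) = 'Ä' :: pvChainA t := by
              unfold pvChainA
              rw [pvRep_pass '%' ['C','3','%','A','4'] 'ä' ['%','C','3','%','8','4'] (by decide)]
              rw [pvRep_hit '%' ['C','3','%','8','4'] 'Ä']
              rw [pvRep_skip '%' ['C','3','%','B','C'] 'ü' 'Ä' _ (by decide)]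
              rw [pvRep_skip '%' ['C','3','%','9','C'] 'Ü' 'Ä' _ (by decide)]
              rw [pvRep_skip '%' ['C','3','%','B','6'] 'ö' 'Ä' _ (by decide)]
              rw [pvRep_skip '%' ['C','3','%','9','6'] 'Ö' 'Ä' _ (by decide)]
              rw [pvRep_skip '%' ['C','3','%','9','F'] 'ß' 'Ä' _ (by decide)]
              rw [pvRep_skip '%' ['2','8'] '(' 'Ä' _ (by decide)]
              rw [pvRep_skip '%' ['2','9'] ')' 'Ä' _ (by decide)]
          _ = 'Ä' :: pvScan n t := by rw [ih t hlt]
          _ = pvScan (n+1) (['%','C','3','%','8','4'] ++ t) := by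
              conv_rhs => rw [pvScan.eq_def]
              rfl
      · -- token 3
        simp only at hpre
        rcases List.isPrefixOf_iff_prefix.mp hpre with ⟨t, rfl⟩
        have hlt : t.length ≤ n := by simp at hl; omega
        calc pvChainA (['%','C','3','%','B','C'] ++ t) = 'ü' :: pvChainA t := by
              unfold pvChainA
              rw [pvRep_pass '%' ['C','3','%','A','4'] 'ä' ['%','C','3','%','B','C'] (by decide)]
              rw [pvRep_pass '%' ['C','3','%','8','4'] 'Ä' ['%','C','3','%','B','C'] (by decide)]
              rw [pvRep_hit '%' ['C','3','%','B','C'] 'ü']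
              rw [pvRep_skip '%' ['C','3','%','9','C'] 'Ü' 'ü' _ (by decide)]
              rw [pvRep_skip '%' ['C','3','%','B','6'] 'ö' 'ü' _ (by decide)]
              rw [pvRep_skip '%' ['C','3','%','9','6'] 'Ö' 'ü' _ (by decide)]
              rw [pvRep_skip '%' ['C','3','%','9','F'] 'ß' 'ü' _ (by decide)]
              rw [pvRep_skip '%' ['2','8'] '(' 'ü' _ (by decide)]
              rw [pvRep_skip '%' ['2','9'] ')' 'ü' _ (by decide)]
          _ = 'ü' :: pvScan n t := by rw [ih t hlt]
          _ = pvScan (n+1) (['%','C','3','%','B','C'] ++ t) := by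
              conv_rhs => rw [pvScan.eq_def]
              rfl
      · -- token 4
        simp only at hpre
        rcases List.isPrefixOf_iff_prefix.mp hpre with ⟨t, rfl⟩
        have hlt : t.length ≤ n := by simp at hl; omega
        calc pvChainA (['%','C','3','%','9','C'] ++ t) = 'Ü' :: pvChainA t := by
              unfold pvChainA
              rw [pvRep_pass '%' ['C','3','%','A','4'] 'ä' ['%','C','3','%','9','C'] (by decide)]
              rw [pvRep_pass '%' ['C','3','%','8','4'] 'Ä' ['%','C','3','%','9','C'] (by decide)]
              rw [pvRep_pass '%' ['C','3','%','B','C'] 'ü' ['%','C','3','%','9','C'] (by decide)]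
              rw [pvRep_hit '%' ['C','3','%','9','C'] 'Ü']
              rw [pvRep_skip '%' ['C','3','%','B','6'] 'ö' 'Ü' _ (by decide)]
              rw [pvRep_skip '%' ['C','3','%','9','6'] 'Ö' 'Ü' _ (by decide)]
              rw [pvRep_skip '%' ['C','3','%','9','F'] 'ß' 'Ü' _ (by decide)]
              rw [pvRep_skip '%' ['2','8'] '(' 'Ü' _ (by decide)]
              rw [pvRep_skip '%' ['2','9'] ')' 'Ü' _ (by decide)]
          _ = 'Ü' :: pvScan n t := by rw [ih t hlt]
          _ = pvScan (n+1) (['%','C','3','%','9','C'] ++ t) := by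
              conv_rhs => rw [pvScan.eq_def]
              rfl
      · -- token 5
        simp only at hpre
        rcases List.isPrefixOf_iff_prefix.mp hpre with ⟨t, rfl⟩
        have hlt : t.length ≤ n := by simp at hl; omega
        calc pvChainA (['%','C','3','%','B','6'] ++ t) = 'ö' :: pvChainA t := by
              unfold pvChainA
              rw [pvRep_pass '%' ['C','3','%','A','4'] 'ä' ['%','C','3','%','B','6'] (by decide)]
              rw [pvRep_pass '%' ['C','3','%','8','4'] 'Ä' ['%','C','3','%','B','6'] (by decide)]
              rw [pvRep_pass '%' ['C','3','%','B','C'] 'ü' ['%','C','3','%','B','6'] (by decide)]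
              rw [pvRep_pass '%' ['C','3','%','9','C'] 'Ü' ['%','C','3','%','B','6'] (by decide)]
              rw [pvRep_hit '%' ['C','3','%','B','6'] 'ö']
              rw [pvRep_skip '%' ['C','3','%','9','6'] 'Ö' 'ö' _ (by decide)]
              rw [pvRep_skip '%' ['C','3','%','9','F'] 'ß' 'ö' _ (by decide)]
              rw [pvRep_skip '%' ['2','8'] '(' 'ö' _ (by decide)]
              rw [pvRep_skip '%' ['2','9'] ')' 'ö' _ (by decide)]
          _ = 'ö' :: pvScan n t := by rw [ih t hlt]
          _ = pvScan (n+1) (['%','C','3','%','B','6'] ++ t) := by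
              conv_rhs => rw [pvScan.eq_def]
              rfl
      · -- token 6
        simp only at hpre
        rcases List.isPrefixOf_iff_prefix.mp hpre with ⟨t, rfl⟩
        have hlt : t.length ≤ n := by simp at hl; omega
        calc pvChainA (['%','C','3','%','9','6'] ++ t) = 'Ö' :: pvChainA t := by
              unfold pvChainA
              rw [pvRep_pass '%' ['C','3','%','A','4'] 'ä' ['%','C','3','%','9','6'] (by decide)]
              rw [pvRep_pass '%' ['C','3','%','8','4'] 'Ä' ['%','C','3','%','9','6'] (by decide)]
              rw [pvRep_pass '%' ['C','3','%','B','C'] 'ü' ['%','C','3','%','9','6'] (by decide)]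
              rw [pvRep_pass '%' ['C','3','%','9','C'] 'Ü' ['%','C','3','%','9','6'] (by decide)]
              rw [pvRep_pass '%' ['C','3','%','B','6'] 'ö' ['%','C','3','%','9','6'] (by decide)]
              rw [pvRep_hit '%' ['C','3','%','9','6'] 'Ö']
              rw [pvRep_skip '%' ['C','3','%','9','F'] 'ß' 'Ö' _ (by decide)]
              rw [pvRep_skip '%' ['2','8'] '(' 'Ö' _ (by decide)]
              rw [pvRep_skip '%' ['2','9'] ')' 'Ö' _ (by decide)]
          _ = 'Ö' :: pvScan n t := by rw [ih t hlt]
          _ = pvScan (n+1) (['%','C','3','%','9','6'] ++ t) := by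
              conv_rhs => rw [pvScan.eq_def]
              rfl
      · -- token 7
        simp only at hpre
        rcases List.isPrefixOf_iff_prefix.mp hpre with ⟨t, rfl⟩
        have hlt : t.length ≤ n := by simp at hl; omega
        calc pvChainA (['%','C','3','%','9','F'] ++ t) = 'ß' :: pvChainA t := by
              unfold pvChainA
              rw [pvRep_pass '%' ['C','3','%','A','4'] 'ä' ['%','C','3','%','9','F'] (by decide)]
              rw [pvRep_pass '%' ['C','3','%','8','4'] 'Ä' ['%','C','3','%','9','F'] (by decide)]
              rw [pvRep_pass '%' ['C','3','%','B','C'] 'ü' ['%','C','3','%','9','F'] (by decide)]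
              rw [pvRep_pass '%' ['C','3','%','9','C'] 'Ü' ['%','C','3','%','9','F'] (by decide)]
              rw [pvRep_pass '%' ['C','3','%','B','6'] 'ö' ['%','C','3','%','9','F'] (by decide)]
              rw [pvRep_pass '%' ['C','3','%','9','6'] 'Ö' ['%','C','3','%','9','F'] (by decide)]
              rw [pvRep_hit '%' ['C','3','%','9','F'] 'ß']
              rw [pvRep_skip '%' ['2','8'] '(' 'ß' _ (by decide)]
              rw [pvRep_skip '%' ['2','9'] ')' 'ß' _ (by decide)]
          _ = 'ß' :: pvScan n t := by rw [ih t hlt]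
          _ = pvScan (n+1) (['%','C','3','%','9','F'] ++ t) := by
              conv_rhs => rw [pvScan.eq_def]
              rfl
      · -- token 8
        simp only at hpre
        rcases List.isPrefixOf_iff_prefix.mp hpre with ⟨t, rfl⟩
        have hlt : t.length ≤ n := by simp at hl; omega
        calc pvChainA (['%','2','8'] ++ t) = '(' :: pvChainA t := by
              unfold pvChainA
              rw [pvRep_pass '%' ['C','3','%','A','4'] 'ä' ['%','2','8'] (by decide)]
              rw [pvRep_pass '%' ['C','3','%','8','4'] 'Ä' ['%','2','8'] (by decide)]
              rw [pvRep_pass '%' ['C','3','%','B','C'] 'ü' ['%','2','8'] (by decide)]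
              rw [pvRep_pass '%' ['C','3','%','9','C'] 'Ü' ['%','2','8'] (by decide)]
              rw [pvRep_pass '%' ['C','3','%','B','6'] 'ö' ['%','2','8'] (by decide)]
              rw [pvRep_pass '%' ['C','3','%','9','6'] 'Ö' ['%','2','8'] (by decide)]
              rw [pvRep_pass '%' ['C','3','%','9','F'] 'ß' ['%','2','8'] (by decide)]
              rw [pvRep_hit '%' ['2','8'] '(']
              rw [pvRep_skip '%' ['2','9'] ')' '(' _ (by decide)]
          _ = '(' :: pvScan n t := by rw [ih t hlt]
          _ = pvScan (n+1) (['%','2','8'] ++ t) := by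
              conv_rhs => rw [pvScan.eq_def]
              rfl
      · -- token 9
        simp only at hpre
        rcases List.isPrefixOf_iff_prefix.mp hpre with ⟨t, rfl⟩
        have hlt : t.length ≤ n := by simp at hl; omega
        calc pvChainA (['%','2','9'] ++ t) = ')' :: pvChainA t := by
              unfold pvChainA
              rw [pvRep_pass '%' ['C','3','%','A','4'] 'ä' ['%','2','9'] (by decide)]
              rw [pvRep_pass '%' ['C','3','%','8','4'] 'Ä' ['%','2','9'] (by decide)]
              rw [pvRep_pass '%' ['C','3','%','B','C'] 'ü' ['%','2','9'] (by decide)]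
              rw [pvRep_pass '%' ['C','3','%','9','C'] 'Ü' ['%','2','9'] (by decide)]
              rw [pvRep_pass '%' ['C','3','%','B','6'] 'ö' ['%','2','9'] (by decide)]
              rw [pvRep_pass '%' ['C','3','%','9','6'] 'Ö' ['%','2','9'] (by decide)]
              rw [pvRep_pass '%' ['C','3','%','9','F'] 'ß' ['%','2','9'] (by decide)]
              rw [pvRep_pass '%' ['2','8'] '(' ['%','2','9'] (by decide)]
              rw [pvRep_hit '%' ['2','9'] ')']
          _ = ')' :: pvScan n t := by rw [ih t hlt]
          _ = pvScan (n+1) (['%','2','9'] ++ t) := by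
              conv_rhs => rw [pvScan.eq_def]
              rfl

-- ===== VERDICT (by name: the statement is the Claim_ definition above) =====
theorem clean_german_url_decode_spec : Claim_equal_clean_german_url_decode := by
  intro md _
  unfold Spec_clean_german_url_decode
  rw [← String.toList_inj]
  have h1 : ∀ s : List Char, PySem.Chars.replace s "%C3%A4".toList "ä".toList = pvRep '%' ['C','3','%','A','4'] 'ä' s := fun s => pvReplace_eq_pvRep _ _ _ s
  have h2 : ∀ s : List Char, PySem.Chars.replace s "%C3%84".toList "Ä".toList = pvRep '%' ['C','3','%','8','4'] 'Ä' s := fun s => pvReplace_eq_pvRep _ _ _ s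
  have h3 : ∀ s : List Char, PySem.Chars.replace s "%C3%BC".toList "ü".toList = pvRep '%' ['C','3','%','B','C'] 'ü' s := fun s => pvReplace_eq_pvRep _ _ _ s
  have h4 : ∀ s : List Char, PySem.Chars.replace s "%C3%9C".toList "Ü".toList = pvRep '%' ['C','3','%','9','C'] 'Ü' s := fun s => pvReplace_eq_pvRep _ _ _ s
  have h5 : ∀ s : List Char, PySem.Chars.replace s "%C3%B6".toList "ö".toList = pvRep '%' ['C','3','%','B','6'] 'ö' s := fun s => pvReplace_eq_pvRep _ _ _ s
  have h6 : ∀ s : List Char, PySem.Chars.replace s "%C3%96".toList "Ö".toList = pvRep '%' ['C','3','%','9','6'] 'Ö' s := fun s => pvReplace_eq_pvRep _ _ _ s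
  have h7 : ∀ s : List Char, PySem.Chars.replace s "%C3%9F".toList "ß".toList = pvRep '%' ['C','3','%','9','F'] 'ß' s := fun s => pvReplace_eq_pvRep _ _ _ s
  have h8 : ∀ s : List Char, PySem.Chars.replace s "%28".toList "(".toList = pvRep '%' ['2','8'] '(' s := fun s => pvReplace_eq_pvRep _ _ _ s
  have h9 : ∀ s : List Char, PySem.Chars.replace s "%29".toList ")".toList = pvRep '%' ['2','9'] ')' s := fun s => pvReplace_eq_pvRep _ _ _ s
  simp only [clean_german_url_decode, clean_german_url_decode_alt, PySem.Str.toList_replace,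
    String.toList_ofList, h1, h2, h3, h4, h5, h6, h7, h8, h9]
  exact pvMain md.toList.length md.toList le_rfl
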